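-- pv_equiv track=rewrite | github.com/mit3r/matura | 2022_05maj/abslowo.py | abslowo
-- ===== SOURCE A (Python) =====
-- def abslowo(n: int, s: str):
--
--     s = ' ' + s
--     A = [0]
--
--     for i in range(1, n+1):
--         if s[i] == 'a':
--             A.append(A[i-1] + 1)
--         else:
--             A.append(A[i-1])
--
--     B = [0 for i in range(n+2)]
--
--     for j in range(n, 0, -1):
--         if s[j] == 'b':
--             B[j] = B[j+1] + 1
--         else:
--             B[j] = B[j + 1]
--
--     k = 1
--
--     for i in range(n+1):
--         if A[i] + B[i+1] > k:
--             k = A[i] + B[i+1]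
--
--     return k
-- ===== SOURCE B (Python) =====
-- def abslowo(n: int, s: str):
--     # Single left-to-right pass: a_here = a's in the prefix so far,
--     # best = best prefix-a + suffix-b total ending at the current position.
--     a_here = 0
--     best = 0
--     for i in range(n):
--         c = s[i]
--         if c == 'a':
--             a_here += 1
--         best = max(best, a_here)
--         if c == 'b':
--             best += 1
--     return max(1, best)
-- ===== Notes on version B (the rewrite author's own statement) =====
-- stated objective: simpler
-- what changed: Replaces the three arrays (prefix-a counts, suffix-b counts, final max scan) with a single left-to-right Kadane-style pass keeping just two integers.
import Mathlib
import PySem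

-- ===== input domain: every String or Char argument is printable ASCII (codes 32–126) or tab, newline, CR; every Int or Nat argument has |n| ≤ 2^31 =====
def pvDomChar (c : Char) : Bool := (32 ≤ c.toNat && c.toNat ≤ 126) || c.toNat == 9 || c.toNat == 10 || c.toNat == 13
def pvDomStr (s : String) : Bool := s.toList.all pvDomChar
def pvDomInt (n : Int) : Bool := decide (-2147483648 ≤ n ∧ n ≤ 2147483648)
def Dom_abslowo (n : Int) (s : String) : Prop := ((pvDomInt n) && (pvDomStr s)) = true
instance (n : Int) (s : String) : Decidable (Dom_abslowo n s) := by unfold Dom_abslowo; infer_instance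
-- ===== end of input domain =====

-- B replaces A's three arrays with a single two-integer left-to-right pass (simpler, O(1) space).

-- ===== PORT A =====
-- literal transliteration: prefix-a array A, suffix-b array B (built downward by mutation), final max scan
def abslowo (n : Int) (s : String) : Int :=
  let cs : List Char := ' ' :: s.toList            -- s = ' ' + s
  let Al : List Int := (PySem.List.pyRange 1 (n+1) 1).foldl (fun Al i =>
      if PySem.List.pyGetD cs i ' ' = 'a' then Al ++ [PySem.List.pyGetD Al (i-1) 0 + 1]
      else Al ++ [PySem.List.pyGetD Al (i-1) 0]) [0]
  let B0 : List Int := (PySem.List.pyRange 0 (n+2) 1).map (fun _ => 0)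
  let Bl : List Int := (PySem.List.pyRange n 0 (-1)).foldl (fun Bl j =>
      if PySem.List.pyGetD cs j ' ' = 'b' then PySem.List.pySetD Bl j (PySem.List.pyGetD Bl (j+1) 0 + 1)
      else PySem.List.pySetD Bl j (PySem.List.pyGetD Bl (j+1) 0)) B0
  (PySem.List.pyRange 0 (n+1) 1).foldl (fun k i =>
      if PySem.List.pyGetD Al i 0 + PySem.List.pyGetD Bl (i+1) 0 > k
      then PySem.List.pyGetD Al i 0 + PySem.List.pyGetD Bl (i+1) 0 else k) 1

-- ===== PORT B =====
-- literal transliteration of Source B: one pass, state (a_here, best)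
def abslowo_alt (n : Int) (s : String) : Int :=
  let p : Int × Int := (PySem.List.pyRange 0 n 1).foldl (fun (st : Int × Int) i =>
      let c := PySem.List.pyGetD s.toList i ' '
      let a := st.1 + (if c = 'a' then 1 else 0)
      let b := max st.2 a + (if c = 'b' then 1 else 0)
      (a, b)) (0, 0)
  max 1 p.2

-- ===== PRECONDITION & SPEC =====
-- Pre_ excludes exactly n > len(s), where both A and B raise IndexError.
def Pre_abslowo (n : Int) (s : String) : Prop := n ≤ (s.toList.length : Int)
instance (n : Int) (s : String) : Decidable (Pre_abslowo n s) := by unfold Pre_abslowo; infer_instance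
def pvWitness_abslowo : Int × String := (4, "abba")
def Spec_abslowo (n : Int) (s : String) (out : Int) : Prop := out = abslowo_alt n s
instance (n : Int) (s : String) (out : Int) : Decidable (Spec_abslowo n s out) := by unfold Spec_abslowo; infer_instance

-- ===== CLAIM (what is proved, stated in full; the proofs are below) =====
def Claim_equal_abslowo : Prop := ∀ (n : Int) (s : String), Dom_abslowo n s → Pre_abslowo n s → Spec_abslowo n s (abslowo n s)

-- ===== LEMMAS AND PROOFS =====

-- counts and the split value
def cA (t : List Char) : Int := t.countP (· = 'a')
def cB (t : List Char) : Int := t.countP (· = 'b')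
def aOf (c : Char) : Int := if c = 'a' then 1 else 0
def bOf (c : Char) : Int := if c = 'b' then 1 else 0
def splitVal (t : List Char) (i : Nat) : Int := cA (t.take i) + cB (t.drop i)
def maxSplit (t : List Char) : Int :=
  (List.range (t.length+1)).foldl (fun k i => max k (splitVal t i)) 0

theorem cA_append (t : List Char) (c : Char) : cA (t ++ [c]) = cA t + aOf c := by
  simp [cA, aOf, List.countP_append, List.countP_cons]

theorem cB_cons (c : Char) (t : List Char) : cB (c :: t) = bOf c + cB t := by
  simp [cB, bOf, List.countP_cons]
  split <;> omega

theorem cA_nonneg (t : List Char) : 0 ≤ cA t := by simp [cA]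
theorem cB_nonneg (t : List Char) : 0 ≤ cB t := by simp [cB]

theorem foldl_max_shift (f : Nat → Int) (c : Int) (L : List Nat) (a : Int) :
    L.foldl (fun k i => max k (f i + c)) (a + c) = L.foldl (fun k i => max k (f i)) a + c := by
  induction L generalizing a with
  | nil => rfl
  | cons x xs ih =>
      simp only [List.foldl_cons]
      rw [max_add_add_right, ih]

theorem foldl_max_base_eq (f : Nat → Int) (k : Nat) (a b : Int)
    (ha : a ≤ f 0) (hb : b ≤ f 0) :
    (List.range (k+1)).foldl (fun m i => max m (f i)) a
      = (List.range (k+1)).foldl (fun m i => max m (f i)) b := by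
  rw [List.range_succ_eq_map]
  simp only [List.foldl_cons]
  rw [max_eq_right ha, max_eq_right hb]

theorem splitVal_take (t : List Char) (c : Char) (i : Nat) (hi : i ≤ t.length) :
    splitVal (t ++ [c]) i = splitVal t i + bOf c := by
  unfold splitVal
  rw [List.take_append_of_le_length hi, List.drop_append_of_le_length hi]
  have : cB (t.drop i ++ [c]) = cB (t.drop i) + bOf c := by
    simp [cB, bOf, List.countP_append, List.countP_cons]
  omega

theorem splitVal_last (t : List Char) (c : Char) :
    splitVal (t ++ [c]) (t.length + 1) = cA t + aOf c := by
  unfold splitVal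
  rw [List.take_of_length_le (by simp), List.drop_of_length_le (by simp)]
  simp [cA_append, cB]

theorem cA_le_maxSplit (t : List Char) : cA t ≤ maxSplit t := by
  have h := (PySem.List.le_foldl_max_int (List.range (t.length+1)) (splitVal t) 0).2
  have hm : t.length ∈ List.range (t.length+1) := by simp
  have := h t.length hm
  simpa [maxSplit, splitVal] using this

theorem maxSplit_append (t : List Char) (c : Char) :
    maxSplit (t ++ [c]) = max (maxSplit t) (cA t + aOf c) + bOf c := by
  have hb0 : (0:Int) ≤ bOf c := by unfold bOf; split <;> simp
  have hlen : (t ++ [c]).length = t.length + 1 := by simp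
  have h1 : maxSplit (t ++ [c])
      = max ((List.range (t.length+1)).foldl (fun k i => max k (splitVal (t++[c]) i)) 0)
            (splitVal (t++[c]) (t.length+1)) := by
    unfold maxSplit
    rw [hlen, List.range_succ, List.foldl_append]
    rfl
  have h2 : (List.range (t.length+1)).foldl (fun k i => max k (splitVal (t++[c]) i)) 0
      = (List.range (t.length+1)).foldl (fun k i => max k (splitVal t i + bOf c)) 0 := by
    apply PySem.List.foldl_congr_mem
    intro a x hx
    rw [splitVal_take t c x (Nat.lt_succ_iff.mp (List.mem_range.mp hx))]
  have h3 : (List.range (t.length+1)).foldl (fun k i => max k (splitVal t i + bOf c)) 0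
      = maxSplit t + bOf c := by
    have hsv0 : (0:Int) + bOf c ≤ splitVal t 0 + bOf c := by
      have h1 := cB_nonneg (t.drop 0); have h2 := cA_nonneg (t.take 0)
      unfold splitVal; omega
    rw [foldl_max_base_eq (fun i => splitVal t i + bOf c) t.length 0 (0 + bOf c)
          (by exact le_trans (by simp [bOf]; split <;> omega) hsv0) hsv0,
        foldl_max_shift]
    rfl
  rw [h1, h2, h3, splitVal_last]
  have hA := cA_le_maxSplit t
  by_cases hcb : c = 'b'
  · have hbo : bOf c = 1 := by simp [bOf, hcb]
    have hao : aOf c = 0 := by subst hcb; decide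
    rw [hbo, hao, max_eq_left (by omega), max_eq_left (by omega)]
  · have hbo : bOf c = 0 := by simp [bOf, hcb]
    rw [hbo]
    omega

-- B's loop body as a function of the character
def stepB (st : Int × Int) (c : Char) : Int × Int :=
  (st.1 + aOf c, max st.2 (st.1 + aOf c) + bOf c)

theorem runB_spec (t : List Char) :
    t.foldl stepB (0, 0) = (cA t, maxSplit t) := by
  induction t using List.reverseRecOn with
  | nil => simp [cA, maxSplit, splitVal]; decide
  | append_singleton t c ih =>
      rw [List.foldl_append, ih]
      simp only [List.foldl_cons, List.foldl_nil, stepB]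
      rw [cA_append, maxSplit_append]

theorem set_replicate_append (r : Nat) (suf : List Int) (v : Int) :
    (List.replicate (r+1) (0:Int) ++ suf).set r v = List.replicate r 0 ++ v :: suf := by
  induction r with
  | zero => simp
  | succ r ih =>
      show (0 :: (List.replicate (r+1) 0 ++ suf)).set (r+1) v = 0 :: (List.replicate r 0 ++ v :: suf)
      rw [List.set_cons_succ, ih]

theorem foldl_max_max (f : Nat → Int) (L : List Nat) (a b : Int) :
    L.foldl (fun k i => max k (f i)) (max a b) = max a (L.foldl (fun k i => max k (f i)) b) := by
  induction L generalizing b with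
  | nil => rfl
  | cons x xs ih => simp only [List.foldl_cons]; rw [max_assoc, ih]

theorem foldl_range_getD {α β : Type} (f : β → α → β) (l : List α) (d : α) (m : Nat)
    (h : m ≤ l.length) (init : β) :
    (List.range m).foldl (fun st j => f st (l.getD j d)) init = (l.take m).foldl f init := by
  induction m with
  | zero => simp
  | succ m ih =>
      have hlt : m < l.length := by omega
      rw [List.range_succ, List.foldl_append, ih (by omega),
          List.take_succ, List.foldl_append]
      simp [List.getElem?_eq_getElem hlt, List.getD]

theorem alt_eq (s : String) (m : Nat) (h : m ≤ s.toList.length) :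
    abslowo_alt (m : Int) s = max 1 (maxSplit (s.toList.take m)) := by
  simp only [abslowo_alt]
  rw [PySem.List.pyRange_zero_natCast, List.foldl_map]
  have hcongr : (List.range m).foldl (fun (st : Int × Int) (j : Nat) =>
        let c := PySem.List.pyGetD s.toList (j : Int) ' '
        let a := st.1 + (if c = 'a' then 1 else 0)
        let b := max st.2 a + (if c = 'b' then 1 else 0)
        (a, b)) (0, 0)
      = (List.range m).foldl (fun st j => stepB st (s.toList.getD j ' ')) (0, 0) := by
    apply PySem.List.foldl_congr_mem
    intro acc x _
    simp [PySem.List.pyGetD_natCast, stepB, aOf, bOf]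
  rw [hcongr, foldl_range_getD stepB s.toList ' ' m h, runB_spec]

theorem loopA (l : List Char) (m : Nat) (h : m ≤ l.length) :
    (PySem.List.pyRange 1 ((m:Int)+1) 1).foldl (fun Al i =>
      if PySem.List.pyGetD (' '::l) i ' ' = 'a' then Al ++ [PySem.List.pyGetD Al (i-1) 0 + 1]
      else Al ++ [PySem.List.pyGetD Al (i-1) 0]) [0]
    = (List.range (m+1)).map (fun j => (cA (l.take j) : Int)) := by
  induction m with
  | zero => rw [PySem.List.pyRange_one_eq_nil (by omega)]; simp [cA]
  | succ m ih =>
      have hlt : m < l.length := by omega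
      have hcast : ((m+1:Nat):Int) + 1 = ((m:Int)+1) + 1 := by push_cast; ring
      rw [hcast, PySem.List.pyRange_one_succ_right (by omega), List.foldl_append, ih (by omega)]
      have hc : PySem.List.pyGetD (' '::l) ((m:Int)+1) ' ' = l[m] := by
        have h1 : ((m:Int)+1) = ((m+1:Nat):Int) := by push_cast; ring
        rw [h1, PySem.List.pyGetD_natCast]
        simp [List.getD, List.getElem?_eq_getElem hlt]
      have ha : PySem.List.pyGetD ((List.range (m+1)).map (fun j => (cA (l.take j) : Int)))
          ((m:Int)+1-1) 0 = cA (l.take m) := by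
        have h1 : ((m:Int)+1-1) = ((m:Nat):Int) := by ring
        rw [h1, PySem.List.pyGetD_natCast]
        simp [List.getD]
      have htake : l.take (m+1) = l.take m ++ [l[m]] := by
        rw [List.take_add_one]; simp [List.getElem?_eq_getElem hlt]
      simp only [List.foldl_cons, List.foldl_nil]
      rw [hc, ha]
      rw [List.range_succ (n := m+1), List.map_append, List.map_singleton, htake, cA_append]
      by_cases hca : l[m] = 'a'
      · rw [if_pos hca]
        have h2 : aOf l[m] = 1 := by rw [hca]; decide
        rw [h2]
      · rw [if_neg hca]
        have h2 : aOf l[m] = 0 := by simp [aOf, hca]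
        rw [h2, add_zero]


theorem loopB (l : List Char) (m : Nat) (h : m ≤ l.length) :
    ∀ k, k ≤ m →
    (PySem.List.pyRange (m:Int) ((m-k:Nat):Int) (-1)).foldl (fun Bl j =>
        if PySem.List.pyGetD (' '::l) j ' ' = 'b'
        then PySem.List.pySetD Bl j (PySem.List.pyGetD Bl (j+1) 0 + 1)
        else PySem.List.pySetD Bl j (PySem.List.pyGetD Bl (j+1) 0))
      ((PySem.List.pyRange 0 ((m:Int)+2) 1).map (fun _ => (0:Int)))
    = List.replicate (m-k+1) (0:Int)
        ++ (List.range' (m-k) (k+1)).map (fun j => (cB ((l.take m).drop j) : Int)) := by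
  intro k
  induction k with
  | zero =>
      intro _
      rw [PySem.List.pyRange_neg_one_eq_nil (by omega), List.foldl_nil]
      have hB0 : (PySem.List.pyRange 0 ((m:Int)+2) 1).map (fun _ => (0:Int))
          = List.replicate (m+2) (0:Int) := by
        rw [List.map_const']
        congr 1
        rw [PySem.List.length_pyRange_one]
        omega
      rw [hB0]
      have hdrop : (l.take m).drop m = [] := List.drop_eq_nil_of_le (by simp)
      simp [hdrop, cB, List.replicate_succ' (n := m+1)]
  | succ k ih =>
      intro hk
      have hj0 : m - (k+1) + 1 = m - k := by omega
      have hsplit : PySem.List.pyRange (m:Int) ((m-(k+1):Nat):Int) (-1)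
          = PySem.List.pyRange (m:Int) ((m-k:Nat):Int) (-1) ++ [((m-k:Nat):Int)] := by
        rw [PySem.List.pyRange_neg_one, PySem.List.pyRange_neg_one]
        have h1 : ((m:Int) - ((m-(k+1):Nat):Int)).toNat = k+1 := by omega
        have h2 : ((m:Int) - ((m-k:Nat):Int)).toNat = k := by omega
        have h3 : (m:Int) - ((k:Nat):Int) = ((m-k:Nat):Int) := by omega
        rw [h1, h2, List.range_succ, List.map_append]
        simp [h3]
      rw [hsplit, List.foldl_append, ih (by omega), List.foldl_cons, List.foldl_nil]
      have hr1 : List.range' (m-k) (k+1) = (m-k) :: List.range' (m-k+1) k := by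
        rw [List.range'_succ]
      have hlt : m - (k+1) < l.length := by omega
      have htlen : (l.take m).length = m := by rw [List.length_take]; omega
      have htlt : m - (k+1) < (l.take m).length := by omega
      have hc : PySem.List.pyGetD (' '::l) ((m-k:Nat):Int) ' ' = l[m-(k+1)] := by
        rw [PySem.List.pyGetD_natCast]
        have : m - k = (m-(k+1)) + 1 := by omega
        rw [this]
        simp [List.getD, List.getElem?_eq_getElem hlt]
      have hread : PySem.List.pyGetD
          (List.replicate (m-k+1) (0:Int)
            ++ (List.range' (m-k) (k+1)).map (fun j => (cB ((l.take m).drop j) : Int)))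
          (((m-k:Nat):Int)+1) 0 = cB ((l.take m).drop (m-k)) := by
        have h1 : (((m-k:Nat):Int)+1) = ((m-k+1:Nat):Int) := by omega
        rw [h1, PySem.List.pyGetD_natCast, hr1]
        simp [List.getD]
      have hdropcons : (l.take m).drop (m-(k+1)) = l[m-(k+1)] :: (l.take m).drop (m-k) := by
        rw [List.drop_eq_getElem_cons htlt, hj0]
        congr 1
        exact List.getElem_take
      have hset : ∀ v : Int, PySem.List.pySetD
          (List.replicate (m-k+1) (0:Int)
            ++ (List.range' (m-k) (k+1)).map (fun j => (cB ((l.take m).drop j) : Int)))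
          ((m-k:Nat):Int) v
          = List.replicate (m-k) (0:Int) ++ v ::
            (List.range' (m-k) (k+1)).map (fun j => (cB ((l.take m).drop j) : Int)) := by
        intro v
        rw [PySem.List.pySetD_natCast]
        rcases Nat.eq_zero_or_pos (m-k) with h0 | hpos
        · simp [h0]
        · have h2 : m - k = (m-k-1) + 1 := by omega
          rw [h2, set_replicate_append]
      have hgoal1 : List.range' (m-(k+1)) (k+1+1) = (m-(k+1)) :: List.range' (m-k) (k+1) := by
        rw [List.range'_succ, hj0]
      rw [hread, hgoal1]
      by_cases hcb : l[m-(k+1)] = 'b'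
      · rw [hc, if_pos hcb, hset]
        have : (cB ((l.take m).drop (m-(k+1))) : Int) = cB ((l.take m).drop (m-k)) + 1 := by
          rw [hdropcons, cB_cons]; simp [bOf, hcb]; omega
        simp [hj0, this]
      · rw [hc, if_neg hcb, hset]
        have : (cB ((l.take m).drop (m-(k+1))) : Int) = cB ((l.take m).drop (m-k)) := by
          rw [hdropcons, cB_cons]; simp [bOf, hcb]
        simp [hj0, this]

theorem A_eq (s : String) (m : Nat) (h : m ≤ s.toList.length) :
    abslowo (m : Int) s = max 1 (maxSplit (s.toList.take m)) := by
  simp only [abslowo]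
  rw [loopA s.toList m h]
  have hB := loopB s.toList m h m le_rfl
  simp only [Nat.sub_self, Nat.cast_zero, Nat.zero_add] at hB
  rw [hB]
  have hcast : ((m:Int)+1) = ((m+1:Nat):Int) := by push_cast; ring
  rw [hcast, PySem.List.pyRange_zero_natCast, List.foldl_map]
  have hcongr : (List.range (m+1)).foldl (fun (k : Int) (j : Nat) =>
        if PySem.List.pyGetD ((List.range (m+1)).map (fun j => (cA (s.toList.take j) : Int))) (j:Int) 0
            + PySem.List.pyGetD (List.replicate 1 (0:Int)
              ++ (List.range' 0 (m+1)).map (fun j => (cB ((s.toList.take m).drop j) : Int))) ((j:Int)+1) 0 > k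
        then PySem.List.pyGetD ((List.range (m+1)).map (fun j => (cA (s.toList.take j) : Int))) (j:Int) 0
            + PySem.List.pyGetD (List.replicate 1 (0:Int)
              ++ (List.range' 0 (m+1)).map (fun j => (cB ((s.toList.take m).drop j) : Int))) ((j:Int)+1) 0
        else k) 1
      = (List.range (m+1)).foldl (fun k j => max k (splitVal (s.toList.take m) j)) 1 := by
    apply PySem.List.foldl_congr_mem
    intro acc j hj
    have hjm : j < m + 1 := List.mem_range.mp hj
    have hA : PySem.List.pyGetD ((List.range (m+1)).map (fun j => (cA (s.toList.take j) : Int))) (j:Int) 0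
        = cA ((s.toList.take m).take j) := by
      rw [PySem.List.pyGetD_natCast]
      simp [List.getD, List.getElem?_map, List.getElem?_range hjm, List.take_take]
      congr 2
      omega
    have hBv : PySem.List.pyGetD (List.replicate 1 (0:Int)
          ++ (List.range' 0 (m+1)).map (fun j => (cB ((s.toList.take m).drop j) : Int))) ((j:Int)+1) 0
        = cB ((s.toList.take m).drop j) := by
      have h1 : ((j:Int)+1) = ((j+1:Nat):Int) := by push_cast; ring
      rw [h1, PySem.List.pyGetD_natCast, ← List.range_eq_range']
      simp [List.getD, List.getElem?_map, List.getElem?_range hjm]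
    rw [hA, hBv]
    unfold splitVal
    split <;> rename_i hgt
    · rw [max_eq_right (by omega)]
    · rw [max_eq_left (by omega)]
  rw [hcongr]
  have hlen : (s.toList.take m).length = m := by rw [List.length_take]; omega
  have hfold : (List.range (m+1)).foldl (fun k i => max k (splitVal (s.toList.take m) i)) 1
      = max 1 ((List.range (m+1)).foldl (fun k i => max k (splitVal (s.toList.take m) i)) 0) := by
    rw [← foldl_max_max]
    norm_num
  rw [hfold]
  unfold maxSplit
  rw [hlen]

theorem neg_case (n : Int) (s : String) (hn : n < 0) :
    abslowo n s = 1 ∧ abslowo_alt n s = 1 := by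
  constructor
  · simp only [abslowo]
    rw [PySem.List.pyRange_one_eq_nil (by omega : n+1 ≤ 1),
        PySem.List.pyRange_neg_one_eq_nil (by omega : n ≤ 0),
        PySem.List.pyRange_one_eq_nil (by omega : n+1 ≤ 0)]
    rfl
  · simp only [abslowo_alt]
    rw [PySem.List.pyRange_one_eq_nil (by omega : n ≤ 0)]
    rfl

-- ===== VERDICT (by name: the statement is the Claim_ definition above) =====
theorem abslowo_spec : Claim_equal_abslowo := by
  intro n s _ hpre
  unfold Spec_abslowo
  rcases lt_or_ge n 0 with hn | hn
  · rw [(neg_case n s hn).1, (neg_case n s hn).2]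
  · obtain ⟨m, rfl⟩ : ∃ m : Nat, n = (m:Int) := ⟨n.toNat, (Int.toNat_of_nonneg hn).symm⟩
    unfold Pre_abslowo at hpre
    have hm : m ≤ s.toList.length := by exact_mod_cast hpre
    rw [A_eq s m hm, alt_eq s m hm]
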